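-- pv_equiv track=rewrite | github.com/Purdue-ECE634/project-2-vector-quantization-and-discrete-cosine-transform-SudhanvaD | part2.py | zigzag_index
-- ===== SOURCE A (Python) =====
-- def zigzag_index(n=8):
--     indices = []
--     for s in range(2 * n - 1):
--         diagonal = []
--
--         for i in range(n):
--             j = s - i
--
--             if 0 <= j < n:
--                 diagonal.append((i, j))
--
--         if s % 2 == 0:
--             diagonal.reverse()
--         indices.extend(diagonal)
--     return indices
-- ===== SOURCE B (Python) =====
-- def zigzag_index(n=8):
--     # Boundary-walking zigzag: single pointer, one step per cell (no per-diagonal scan of all n rows).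
--     if n <= 0:
--         return []
--     out = []
--     r = c = 0
--     up = True
--     for _ in range(n * n):
--         out.append((r, c))
--         if up:
--             if c == n - 1:
--                 r += 1
--                 up = False
--             elif r == 0:
--                 c += 1
--                 up = False
--             else:
--                 r -= 1
--                 c += 1
--         else:
--             if r == n - 1:
--                 c += 1
--                 up = True
--             elif c == 0:
--                 r += 1
--                 up = True
--             else:
--                 r += 1
--                 c -= 1
--     return out
-- ===== Notes on version B (the rewrite author's own statement) =====
-- stated objective: alternative
-- what changed: Replaced the per-diagonal scan of all n rows (2n-1 diagonals, each filtering i in range(n), with a reverse on even diagonals) by the classic single-pointer boundary walk: keep (row,col) and a direction, emit one cell per step for n*n steps, turning at the grid boundary.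
import Mathlib
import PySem

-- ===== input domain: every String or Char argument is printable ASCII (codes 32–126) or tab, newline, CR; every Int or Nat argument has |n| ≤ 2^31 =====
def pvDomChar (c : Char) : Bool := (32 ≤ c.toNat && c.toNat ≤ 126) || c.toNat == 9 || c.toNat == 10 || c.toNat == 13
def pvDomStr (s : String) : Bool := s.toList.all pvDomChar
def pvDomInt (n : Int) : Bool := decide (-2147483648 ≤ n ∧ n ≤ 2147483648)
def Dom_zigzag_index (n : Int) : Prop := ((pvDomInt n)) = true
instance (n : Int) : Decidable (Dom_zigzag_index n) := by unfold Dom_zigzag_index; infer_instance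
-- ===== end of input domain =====

-- B replaces A's per-diagonal scan of all n rows by the classic single-pointer boundary walk
-- (one step per emitted cell); objective: alternative algorithm, not claimed faster.

-- ===== PORT A =====
def zigzag_index (n : Int) : List (Int × Int) :=
  (PySem.List.pyRange 0 (2 * n - 1) 1).foldl (fun indices s =>
    let diagonal : List (Int × Int) :=
      (PySem.List.pyRange 0 n 1).foldl (fun diagonal i =>
        let j := s - i
        if 0 ≤ j ∧ j < n then diagonal ++ [(i, j)] else diagonal) []
    let diagonal := if PySem.Int.mod s 2 = 0 then diagonal.reverse else diagonal
    indices ++ diagonal) []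

-- ===== PORT B =====
-- one step of the boundary walk: append the current cell, then move/turn
def zzStep (n : Int) (st : List (Int × Int) × Int × Int × Bool) :
    List (Int × Int) × Int × Int × Bool :=
  match st with
  | (out, r, c, up) =>
    let out := out ++ [(r, c)]
    if up then
      if c = n - 1 then (out, r + 1, c, false)
      else if r = 0 then (out, r, c + 1, false)
      else (out, r - 1, c + 1, true)
    else
      if r = n - 1 then (out, r, c + 1, true)
      else if c = 0 then (out, r + 1, c, true)
      else (out, r + 1, c - 1, false)

def zigzag_index_alt (n : Int) : List (Int × Int) :=
  if n ≤ 0 then []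
  else ((PySem.List.pyRange 0 (n * n) 1).foldl (fun st _ => zzStep n st)
          ([], 0, 0, true)).1

-- ===== PRECONDITION & SPEC =====
def Spec_zigzag_index (n : Int) (out : List (Int × Int)) : Prop := out = zigzag_index_alt n
instance (n : Int) (out : List (Int × Int)) : Decidable (Spec_zigzag_index n out) := by unfold Spec_zigzag_index; infer_instance

-- ===== CLAIM (what is proved, stated in full; the proofs are below) =====
def Claim_equal_zigzag_index : Prop := ∀ (n : Int), Dom_zigzag_index n → Spec_zigzag_index n (zigzag_index n)

-- ===== LEMMAS AND PROOFS =====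

-- cons-style walker used by the proofs
def zzNextUp (n r c : Int) : Int × Int × Bool :=
  if c = n - 1 then (r + 1, c, false)
  else if r = 0 then (r, c + 1, false)
  else (r - 1, c + 1, true)

def zzNextDown (n r c : Int) : Int × Int × Bool :=
  if r = n - 1 then (r, c + 1, true)
  else if c = 0 then (r + 1, c, true)
  else (r + 1, c - 1, false)

def zzW (n : Int) : Nat → Int → Int → Bool → List (Int × Int)
  | 0, _, _, _ => []
  | k + 1, r, c, up =>
    let s := if up then zzNextUp n r c else zzNextDown n r c
    (r, c) :: zzW n k s.1 s.2.1 s.2.2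

-- the diagonal segment of diagonal s, low-i to high-i
def zzSeg (n s : Int) : List (Int × Int) :=
  (PySem.List.pyRange (max 0 (s - n + 1)) (min n (s + 1)) 1).map (fun i => (i, s - i))

def zzDiag (n s : Int) : List (Int × Int) :=
  if s % 2 = 0 then (zzSeg n s).reverse else zzSeg n s

-- the walker state at the start of diagonal s
def zzStart (n s : Int) : Int × Int × Bool :=
  if s % 2 = 0 then (min s (n - 1), s - min s (n - 1), true)
  else (max 0 (s - n + 1), s - max 0 (s - n + 1), false)

-- B's foldl equals the cons-style walker
theorem zzFold_eq_zzW (n : Int) : ∀ (l : List Int) (out : List (Int × Int)) (r c : Int) (up : Bool),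
    (l.foldl (fun st _ => zzStep n st) (out, r, c, up)).1
      = out ++ zzW n l.length r c up := by
  intro l
  induction l with
  | nil => intro out r c up; simp [zzW]
  | cons a l ih =>
    intro out r c up
    simp only [List.foldl_cons, List.length_cons]
    have hstep : zzStep n (out, r, c, up)
        = (out ++ [(r, c)], if up then zzNextUp n r c else zzNextDown n r c) := by
      cases up <;> simp only [zzStep, zzNextUp, zzNextDown, Bool.false_eq_true, if_false,
        if_true] <;> split_ifs <;> rfl
    rw [hstep]
    rcases h : (if up then zzNextUp n r c else zzNextDown n r c) with ⟨r', c', u'⟩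
    rw [ih (out ++ [(r, c)]) r' c' u']
    have hW : zzW n (l.length + 1) r c up = (r, c) :: zzW n l.length r' c' u' := by
      simp [zzW, h]
    rw [hW, List.append_assoc, List.singleton_append]

-- interval filter of a range
theorem filter_pyRange_interval : ∀ (k : Nat) (a lo hi : Int),
    (PySem.List.pyRange a (a + k) 1).filter (fun i => decide (lo ≤ i ∧ i < hi))
      = PySem.List.pyRange (max a lo) (min (a + k) hi) 1 := by
  intro k
  induction k with
  | zero =>
    intro a lo hi
    rw [PySem.List.pyRange_one_eq_nil (by omega), PySem.List.pyRange_one_eq_nil (by omega)]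
    simp
  | succ k ih =>
    intro a lo hi
    have hsplit : a + (k + 1 : Nat) = (a + k) + 1 := by push_cast; ring
    rw [hsplit, PySem.List.pyRange_one_succ_right (by omega), List.filter_append, ih]
    by_cases h : lo ≤ a + (k : Int) ∧ a + (k : Int) < hi
    · have h1 : min (a + (k : Int)) hi = a + k := by omega
      have h2 : min ((a + (k : Int)) + 1) hi = (a + k) + 1 := by omega
      rw [h1, h2, PySem.List.pyRange_one_succ_right (by omega)]
      simp [h]
    · have hf : List.filter (fun i => decide (lo ≤ i ∧ i < hi)) [a + (k : Int)] = [] := by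
        simp only [List.filter_singleton]
        rw [decide_eq_false h]
        rfl
      rw [hf, List.append_nil]
      by_cases h2 : a + (k : Int) < lo
      · rw [PySem.List.pyRange_one_eq_nil (by omega), PySem.List.pyRange_one_eq_nil (by omega)]
      · have : min (a + (k : Int)) hi = min ((a + (k : Int)) + 1) hi := by omega
        rw [this]

theorem zzFoldIf (P : Int → Prop) [DecidablePred P] (f : Int → Int × Int) :
    ∀ (l : List Int) (acc : List (Int × Int)),
      l.foldl (fun d i => if P i then d ++ [f i] else d) acc
        = acc ++ (l.filter (fun i => decide (P i))).map f := by
  intro l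
  induction l with
  | nil => intro acc; simp
  | cons a l ih =>
    intro acc
    simp only [List.foldl_cons, List.filter_cons]
    by_cases h : P a <;> simp [h, ih]

theorem zzInner (n s : Int) (hn : 1 ≤ n) (_hs : 0 ≤ s) :
    (PySem.List.pyRange 0 n 1).foldl (fun diagonal i =>
        let j := s - i
        if 0 ≤ j ∧ j < n then diagonal ++ [(i, j)] else diagonal) []
      = zzSeg n s := by
  show (PySem.List.pyRange 0 n 1).foldl (fun diagonal i =>
        if 0 ≤ s - i ∧ s - i < n then diagonal ++ [(i, s - i)] else diagonal) []
      = zzSeg n s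
  rw [zzFoldIf (fun i => 0 ≤ s - i ∧ s - i < n) (fun i => (i, s - i))]
  rw [List.filter_congr (q := fun i => decide (s - n + 1 ≤ i ∧ i < s + 1))
        (by intro i _; simp only [decide_eq_decide]; omega)]
  have h0 : (0 : Int) + (n.toNat : Int) = n := by omega
  rw [show (PySem.List.pyRange 0 n 1) = PySem.List.pyRange 0 (0 + (n.toNat : Int)) 1 by rw [h0]]
  rw [filter_pyRange_interval]
  unfold zzSeg
  rw [h0]
  simp

theorem zigzag_eq_flatMap (n : Int) :
    zigzag_index n = (PySem.List.pyRange 0 (2 * n - 1) 1).flatMap (zzDiag n) := by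
  by_cases hn : n ≤ 0
  · unfold zigzag_index
    rw [show PySem.List.pyRange 0 (2 * n - 1) 1 = [] from PySem.List.pyRange_one_eq_nil (by omega)]
    simp
  · have hn1 : 1 ≤ n := by omega
    unfold zigzag_index
    have key : ∀ (l : List Int), (∀ s ∈ l, 0 ≤ s) → ∀ (init : List (Int × Int)),
        l.foldl (fun indices s =>
          let diagonal : List (Int × Int) :=
            (PySem.List.pyRange 0 n 1).foldl (fun diagonal i =>
              let j := s - i
              if 0 ≤ j ∧ j < n then diagonal ++ [(i, j)] else diagonal) []
          let diagonal := if PySem.Int.mod s 2 = 0 then diagonal.reverse else diagonal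
          indices ++ diagonal) init
        = init ++ l.flatMap (zzDiag n) := by
      intro l
      induction l with
      | nil => intro _ init; simp
      | cons a l ih =>
        intro hmem init
        have ha : 0 ≤ a := hmem a (by simp)
        simp only [List.foldl_cons, List.flatMap_cons]
        rw [ih (fun s hs => hmem s (by simp [hs]))]
        rw [zzInner n a hn1 ha]
        have hmod : PySem.Int.mod a 2 = a % 2 := PySem.Int.mod_eq_emod_of_pos (by omega)
        unfold zzDiag
        rw [hmod, List.append_assoc]
    rw [key _ (fun s hs => by
          have := (PySem.List.mem_pyRange_one).1 hs
          omega)]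
    simp

-- an up-right run of the walker
theorem zzW_runUp (n : Int) : ∀ (k rest : Nat) (r c : Int),
    (∀ t : Nat, t < k → c + (t : Int) ≠ n - 1 ∧ r - (t : Int) ≠ 0) →
    zzW n (k + 1 + rest) r c true
      = (List.range (k + 1)).map (fun t : Nat => (r - (t : Int), c + (t : Int)))
        ++ zzW n rest (zzNextUp n (r - (k : Int)) (c + (k : Int))).1
            (zzNextUp n (r - (k : Int)) (c + (k : Int))).2.1
            (zzNextUp n (r - (k : Int)) (c + (k : Int))).2.2 := by
  intro k
  induction k with
  | zero =>
    intro rest r c _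
    rw [show 0 + 1 + rest = rest + 1 from by omega]
    show (r, c) :: zzW n rest (zzNextUp n r c).1 (zzNextUp n r c).2.1 (zzNextUp n r c).2.2 = _
    simp
  | succ k ih =>
    intro rest r c hint
    obtain ⟨h1, h2⟩ := hint 0 (by omega)
    simp only [Nat.cast_zero, add_zero, sub_zero] at h1 h2
    have hnext : zzNextUp n r c = (r - 1, c + 1, true) := by
      unfold zzNextUp; rw [if_neg h1, if_neg h2]
    have hstep : zzW n (k + 1 + 1 + rest) r c true
        = (r, c) :: zzW n (k + 1 + rest) (r - 1) (c + 1) true := by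
      rw [show k + 1 + 1 + rest = (k + 1 + rest) + 1 from by omega]
      show (r, c) :: zzW n (k + 1 + rest) (zzNextUp n r c).1 (zzNextUp n r c).2.1
            (zzNextUp n r c).2.2 = _
      rw [hnext]
    rw [hstep, ih rest (r - 1) (c + 1) (by
      intro t ht
      obtain ⟨g1, g2⟩ := hint (t + 1) (by omega)
      push_cast at g1 g2 ⊢
      constructor <;> intro hcon <;> [apply g1; apply g2] <;> omega)]
    have hcells : (List.range (k + 1 + 1)).map (fun t : Nat => ((r : Int) - (t : Int), c + (t : Int)))
        = (r, c) :: (List.range (k + 1)).map (fun t : Nat => (r - 1 - (t : Int), c + 1 + (t : Int))) := by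
      rw [List.range_succ_eq_map, List.map_cons, List.map_map]
      simp only [Nat.cast_zero, sub_zero, add_zero]
      congr 1
      apply List.map_congr_left
      intro t _
      simp only [Function.comp_apply, Prod.mk.injEq]
      push_cast
      constructor <;> ring
    rw [hcells]
    have e1 : (r : Int) - ((k : Nat) + 1 : Nat) = r - 1 - (k : Int) := by push_cast; ring
    have e2 : (c : Int) + ((k : Nat) + 1 : Nat) = c + 1 + (k : Int) := by push_cast; ring
    rw [e1, e2, List.cons_append]

-- a down-left run of the walker
theorem zzW_runDown (n : Int) : ∀ (k rest : Nat) (r c : Int),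
    (∀ t : Nat, t < k → r + (t : Int) ≠ n - 1 ∧ c - (t : Int) ≠ 0) →
    zzW n (k + 1 + rest) r c false
      = (List.range (k + 1)).map (fun t : Nat => (r + (t : Int), c - (t : Int)))
        ++ zzW n rest (zzNextDown n (r + (k : Int)) (c - (k : Int))).1
            (zzNextDown n (r + (k : Int)) (c - (k : Int))).2.1
            (zzNextDown n (r + (k : Int)) (c - (k : Int))).2.2 := by
  intro k
  induction k with
  | zero =>
    intro rest r c _
    rw [show 0 + 1 + rest = rest + 1 from by omega]
    show (r, c) :: zzW n rest (zzNextDown n r c).1 (zzNextDown n r c).2.1 (zzNextDown n r c).2.2 = _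
    simp
  | succ k ih =>
    intro rest r c hint
    obtain ⟨h1, h2⟩ := hint 0 (by omega)
    simp only [Nat.cast_zero, add_zero, sub_zero] at h1 h2
    have hnext : zzNextDown n r c = (r + 1, c - 1, false) := by
      unfold zzNextDown; rw [if_neg h1, if_neg h2]
    have hstep : zzW n (k + 1 + 1 + rest) r c false
        = (r, c) :: zzW n (k + 1 + rest) (r + 1) (c - 1) false := by
      rw [show k + 1 + 1 + rest = (k + 1 + rest) + 1 from by omega]
      show (r, c) :: zzW n (k + 1 + rest) (zzNextDown n r c).1 (zzNextDown n r c).2.1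
            (zzNextDown n r c).2.2 = _
      rw [hnext]
    rw [hstep, ih rest (r + 1) (c - 1) (by
      intro t ht
      obtain ⟨g1, g2⟩ := hint (t + 1) (by omega)
      push_cast at g1 g2 ⊢
      constructor <;> intro hcon <;> [apply g1; apply g2] <;> omega)]
    have hcells : (List.range (k + 1 + 1)).map (fun t : Nat => ((r : Int) + (t : Int), c - (t : Int)))
        = (r, c) :: (List.range (k + 1)).map (fun t : Nat => (r + 1 + (t : Int), c - 1 - (t : Int))) := by
      rw [List.range_succ_eq_map, List.map_cons, List.map_map]
      simp only [Nat.cast_zero, sub_zero, add_zero]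
      congr 1
      apply List.map_congr_left
      intro t _
      simp only [Function.comp_apply, Prod.mk.injEq]
      push_cast
      constructor <;> ring
    rw [hcells]
    have e1 : (r : Int) + ((k : Nat) + 1 : Nat) = r + 1 + (k : Int) := by push_cast; ring
    have e2 : (c : Int) - ((k : Nat) + 1 : Nat) = c - 1 - (k : Int) := by push_cast; ring
    rw [e1, e2, List.cons_append]

-- main walk lemma: started at the head of diagonal s with fuel = remaining length,
-- the walker emits exactly the remaining diagonals
theorem zzMain (n : Int) (hn : 1 ≤ n) : ∀ (t : Nat) (s : Int), 0 ≤ s → s + t = 2 * n - 1 →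
    zzW n ((PySem.List.pyRange s (2 * n - 1) 1).flatMap (zzDiag n)).length
        (zzStart n s).1 (zzStart n s).2.1 (zzStart n s).2.2
      = (PySem.List.pyRange s (2 * n - 1) 1).flatMap (zzDiag n) := by
  intro t
  induction t with
  | zero =>
    intro s hs h
    rw [PySem.List.pyRange_one_eq_nil (by omega)]
    simp [zzW]
  | succ t ih =>
    intro s hs h
    have hslt : s < 2 * n - 1 := by omega
    rw [PySem.List.pyRange_one_cons hslt, List.flatMap_cons]
    have hlo0 : (0 : Int) ≤ max 0 (s - n + 1) := by omega
    set lo := max 0 (s - n + 1) with hlodef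
    set hi := min s (n - 1) with hhidef
    have hlohi : lo ≤ hi := by omega
    have hsn : min n (s + 1) = hi + 1 := by omega
    have hseg : zzSeg n s = (PySem.List.pyRange lo (hi + 1) 1).map (fun i => (i, s - i)) := by
      unfold zzSeg; rw [hsn]
    set k' : Nat := (hi - lo).toNat with hk'def
    have hk'cast : (k' : Int) = hi - lo := by omega
    have hrest := ih (s + 1) (by omega) (by omega)
    by_cases hpar : s % 2 = 0
    · -- even diagonal: up-right run starting at (hi, s - hi)
      have hstart : zzStart n s = (hi, s - hi, true) := by
        unfold zzStart; rw [if_pos hpar]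
      have hrev : (PySem.List.pyRange lo (hi + 1) 1).reverse
          = PySem.List.pyRange hi (lo - 1) (-1) := by
        rw [PySem.List.pyRange_neg_one_eq_reverse, show lo - 1 + 1 = lo from by ring]
      have hdiag : zzDiag n s
          = (List.range (k' + 1)).map (fun u : Nat => (hi - (u : Int), (s - hi) + (u : Int))) := by
        unfold zzDiag
        rw [if_pos hpar, hseg, ← List.map_reverse, hrev, PySem.List.pyRange_neg_one,
          List.map_map, show (hi - (lo - 1)).toNat = k' + 1 from by omega]
        apply List.map_congr_left
        intro u _
        simp only [Function.comp_apply, Prod.mk.injEq]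
        exact ⟨by trivial, by ring⟩
      rw [hdiag, hstart]
      dsimp only
      rw [List.length_append, List.length_map, List.length_range]
      rw [zzW_runUp n k' _ hi (s - hi) (by
        intro u hu
        constructor <;> intro hcon <;> omega)]
      have hend : zzNextUp n (hi - (k' : Int)) ((s - hi) + (k' : Int)) = zzStart n (s + 1) := by
        rw [show hi - (k' : Int) = lo from by omega,
            show (s - hi) + (k' : Int) = s - lo from by omega]
        unfold zzNextUp zzStart
        rw [if_neg (show ¬((s + 1) % 2 = 0) from by omega)]
        by_cases hb : s - lo = n - 1
        · rw [if_pos hb]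
          simp only [Prod.mk.injEq]
          refine ⟨by omega, by omega, trivial⟩
        · rw [if_neg hb, if_pos (show lo = 0 from by omega)]
          simp only [Prod.mk.injEq]
          refine ⟨by omega, by omega, trivial⟩
      rw [hend, hrest]
    · -- odd diagonal: down-left run starting at (lo, s - lo)
      have hpar1 : s % 2 = 1 := by omega
      have hstart : zzStart n s = (lo, s - lo, false) := by
        unfold zzStart; rw [if_neg hpar]
      have hdiag : zzDiag n s
          = (List.range (k' + 1)).map (fun u : Nat => (lo + (u : Int), (s - lo) - (u : Int))) := by
        unfold zzDiag
        rw [if_neg hpar, hseg, PySem.List.pyRange_one,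
          show (hi + 1 - lo).toNat = k' + 1 from by omega, List.map_map]
        apply List.map_congr_left
        intro u _
        simp only [Function.comp_apply, Prod.mk.injEq]
        exact ⟨by trivial, by ring⟩
      rw [hdiag, hstart]
      dsimp only
      rw [List.length_append, List.length_map, List.length_range]
      rw [zzW_runDown n k' _ lo (s - lo) (by
        intro u hu
        constructor <;> intro hcon <;> omega)]
      have hend : zzNextDown n (lo + (k' : Int)) ((s - lo) - (k' : Int)) = zzStart n (s + 1) := by
        rw [show lo + (k' : Int) = hi from by omega,
            show (s - lo) - (k' : Int) = s - hi from by omega]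
        unfold zzNextDown zzStart
        rw [if_pos (show (s + 1) % 2 = 0 from by omega)]
        by_cases hb : hi = n - 1
        · rw [if_pos hb]
          simp only [Prod.mk.injEq]
          refine ⟨by omega, by omega, trivial⟩
        · rw [if_neg hb, if_pos (show s - hi = 0 from by omega)]
          simp only [Prod.mk.injEq]
          refine ⟨by omega, by omega, trivial⟩
      rw [hend, hrest]

theorem sum_map_succ : ∀ (l : List Nat) (h : Nat → Nat),
    (l.map (fun u => h u + 1)).sum = (l.map h).sum + l.length := by
  intro l h
  induction l with
  | nil => simp
  | cons a l ih =>
    simp only [List.map_cons, List.sum_cons, List.length_cons, ih]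
    omega

-- the triangle-sum on which the total length rests
theorem zzSumStep : ∀ (L : Nat),
    ((List.range (L + 2)).map (fun t => min (t + 1) (L + 2 - t))).sum
      = ((List.range L).map (fun t => min (t + 1) (L - t))).sum + (L + 2) := by
  intro L
  rw [show L + 2 = L + 1 + 1 from by omega]
  rw [List.range_succ_eq_map, List.range_succ, List.map_cons, List.map_map, List.map_append,
      List.sum_cons, List.sum_append]
  have h1 : (List.range L).map ((fun t => min (t + 1) (L + 1 + 1 - t)) ∘ Nat.succ)
      = (List.range L).map (fun u => min (u + 1) (L - u) + 1) := by
    apply List.map_congr_left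
    intro u hu
    rw [List.mem_range] at hu
    simp only [Function.comp_apply]
    omega
  rw [h1, sum_map_succ, List.length_range]
  simp only [List.map_cons, List.map_nil, List.sum_cons, List.sum_nil, Function.comp_apply]
  omega

theorem zzSumSq : ∀ (m : Nat),
    ((List.range (2 * m - 1)).map (fun t => min (t + 1) (2 * m - 1 - t))).sum = m * m := by
  intro m
  induction m with
  | zero => simp
  | succ m ih =>
    rcases Nat.eq_zero_or_pos m with hm | hm
    · subst hm; decide
    · rw [show 2 * (m + 1) - 1 = (2 * m - 1) + 2 from by omega]
      rw [zzSumStep, ih]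
      have hsq : (m + 1) * (m + 1) = m * m + (2 * m + 1) := by ring
      rw [show (2 * m - 1) + 2 = 2 * m + 1 from by omega, hsq]

theorem zigzag_length (n : Int) (hn : 1 ≤ n) :
    (zigzag_index n).length = (n * n).toNat := by
  have hm : n = (n.toNat : Int) := by omega
  set m : Nat := n.toNat with hmdef
  have hlen : ∀ s : Int, (zzDiag n s).length = (min n (s + 1) - max 0 (s - n + 1)).toNat := by
    intro s
    unfold zzDiag
    rw [apply_ite List.length, List.length_reverse, ite_self]
    unfold zzSeg
    rw [List.length_map, PySem.List.length_pyRange_one]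
  rw [zigzag_eq_flatMap, List.length_flatMap, PySem.List.pyRange_one, List.map_map]
  rw [show ((2 * n - 1 - 0).toNat) = 2 * m - 1 from by omega]
  rw [List.map_congr_left (g := fun t : Nat => min (t + 1) (2 * m - 1 - t)) (by
    intro x hx
    rw [List.mem_range] at hx
    simp only [Function.comp_apply, zero_add]
    rw [hlen]
    omega)]
  rw [zzSumSq, hm, ← Nat.cast_mul, Int.toNat_natCast]

-- ===== VERDICT (by name: the statement is the Claim_ definition above) =====
theorem zigzag_index_spec : Claim_equal_zigzag_index := by
  unfold Claim_equal_zigzag_index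
  intro n _
  unfold Spec_zigzag_index
  by_cases hn : n ≤ 0
  · unfold zigzag_index zigzag_index_alt
    rw [if_pos hn,
      show PySem.List.pyRange 0 (2 * n - 1) 1 = [] from PySem.List.pyRange_one_eq_nil (by omega)]
    rfl
  · have hn1 : 1 ≤ n := by omega
    unfold zigzag_index_alt
    rw [if_neg hn, zzFold_eq_zzW, PySem.List.length_pyRange_one, List.nil_append]
    have hfuel : (n * n - 0).toNat = (zigzag_index n).length := by
      rw [zigzag_length n hn1]
      congr 1
      ring
    rw [hfuel]
    have hstart : zzStart n 0 = (0, 0, true) := by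
      unfold zzStart
      rw [if_pos (by norm_num), show min (0 : Int) (n - 1) = 0 from by omega]
      norm_num
    have hmain := zzMain n hn1 (2 * n - 1).toNat 0 (le_refl 0) (by omega)
    rw [hstart] at hmain
    dsimp only at hmain
    rw [zigzag_eq_flatMap]
    exact hmain.symm
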